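-- pv_equiv track=rewrite | github.com/gotlibsh/aoc2023 | solution/28.py | spin_x_cycles
-- ===== SOURCE A (Python) =====
-- def transpose(platform):
--     return [''.join(col) for col in zip(*platform, strict=True)]
--
-- def rotate(platform):
--     return [''.join(col) for col in zip(*reversed(platform))]
--
-- def tilt_north(platform):
--     def new_position(new_col, index):
--         for i in range(index-1, -1, -1):
--             if new_col[i] in 'O#':
--                 return i+1
--
--         return 0
--
--     platform_cols = transpose(platform)
--     res = []
--
--     for col in platform_cols:
--         new_col = [c if c == '#' else '.' for c in col]
--
--         for i,tile in enumerate(col):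
--             if tile != 'O':
--                 continue
--
--             new_pos = new_position(new_col, i)
--             new_col[new_pos] = 'O'
--
--         res.append(new_col)
--
--     return transpose(res)
--
-- def spin_cycle(platform):
--     # north, west, south, east
--
--     # north
--     platform = tilt_north(platform)
--
--     # west, rotate clockwise and tilt north
--     platform = rotate(platform)
--     platform = tilt_north(platform)
--
--     # south, rotate clockwise once again then tilt north
--     platform = rotate(platform)
--     platform = tilt_north(platform)
--
--     # east, same
--     platform = rotate(platform)
--     platform = tilt_north(platform)
--
--     return rotate(platform) # rotate back to original form
--
-- def plat_to_str(platform):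
--     return '\n'.join(platform)
--
-- def spin_x_cycles(platform, x):
--     steps = 0
--     visited = {} # maps each state (=spin) to the number of steps it takes getting there
--
--     while (plat_str := plat_to_str(platform)) not in visited:
--         visited[plat_str] = steps
--         platform = spin_cycle(platform)
--         steps += 1
--
--     cycle_start = visited[plat_str]
--     cycle_size = steps - cycle_start
--     remaining = (x - cycle_start) % cycle_size
--
--     for _ in range(remaining):
--         platform = spin_cycle(platform)
--
--     return platform
-- ===== SOURCE B (Python) =====
-- def spin_x_cycles(platform, x):
--     def tilt_col(col):
--         # single left-to-right pass: count rollers and gaps per segment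
--         out = []
--         o = d = 0
--         for c in col:
--             if c == '#':
--                 out.append('O' * o + '.' * d + '#')
--                 o = d = 0
--             elif c == 'O':
--                 o += 1
--             else:
--                 d += 1
--         out.append('O' * o + '.' * d)
--         return ''.join(out)
--
--     def transpose(p):
--         return [''.join(col) for col in zip(*p, strict=True)]
--
--     def rotate(p):
--         return [''.join(col) for col in zip(*reversed(p))]
--
--     def spin(p):
--         for _ in range(4):
--             p = transpose([tilt_col(col) for col in transpose(p)])
--             p = rotate(p)
--         return p
--
--     seen = {}
--     states = []
--     while (key := '\n'.join(platform)) not in seen: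
--         seen[key] = len(states)
--         states.append(platform)
--         platform = spin(platform)
--     start = seen[key]
--     period = len(states) - start
--     return states[start + (x - start) % period]
-- ===== Notes on version B (the rewrite author's own statement) =====
-- stated objective: alternative
-- what changed: Each tilt is a single forward pass counting rollers/gaps per '#'-segment instead of a backward rescan of the column for every 'O', and the cycle loop stores the visited platforms in a list and returns the answer by direct index into it instead of re-simulating the remaining spins (measured ~1.2x on generated boards, below the 1.5x bar, so no speed is claimed).
-- intended difference: On the single input platform=[''] (any x), A's newline-joined state key '' collides with the key of the empty platform [] so A returns [], while B, indexing the stored states, returns [''] — the platform unchanged by any number of spins, which is the intended fixed point. — e.g. on spin_x_cycles([""], 5): A returns [], B returns [""]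
import Mathlib
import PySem

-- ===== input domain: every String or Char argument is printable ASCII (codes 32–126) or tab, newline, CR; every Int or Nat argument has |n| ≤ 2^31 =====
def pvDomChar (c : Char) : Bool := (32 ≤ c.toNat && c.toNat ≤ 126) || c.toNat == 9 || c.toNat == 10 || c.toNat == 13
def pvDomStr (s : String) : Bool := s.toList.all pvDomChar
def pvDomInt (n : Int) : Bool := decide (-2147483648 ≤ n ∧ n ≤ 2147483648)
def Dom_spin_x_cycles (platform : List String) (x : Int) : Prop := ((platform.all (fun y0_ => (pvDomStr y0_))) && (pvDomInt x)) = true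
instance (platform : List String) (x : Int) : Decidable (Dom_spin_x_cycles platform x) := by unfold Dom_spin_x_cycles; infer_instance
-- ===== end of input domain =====

-- B replaces A's per-'O' backward rescan by a one-pass counting tilt and returns the cached
-- state by direct index instead of re-simulating the remaining spins (objective: alternative).

-- ===== PORT A =====

-- zip(*rows) over char-lists: one output row of heads while no argument is exhausted.
-- Used for both transpose (strict; Pre_ keeps inputs rectangular, so the ValueError
-- branch of strict=True is never reached) and rotate (non-strict: same stop condition).
-- The Nat argument only totalises the recursion (it bounds the number of zip steps).
def zipColsAux : Nat → List (List Char) → List (List Char)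
  | 0, _ => []
  | n + 1, rows =>
    if rows.isEmpty || rows.any (·.isEmpty) then []
    else (rows.map (·.headD ' ')) :: zipColsAux n (rows.map (·.tail))

def zipCols (rows : List (List Char)) : List (List Char) :=
  zipColsAux (rows.headD []).length rows

def dirtA (c : Char) : Char := if c = '#' then c else '.'

-- new_position(new_col, index): scan new_col[index-1 .. 0] for the last blocker
def newPosA (nc : List Char) : Nat → Nat
  | 0 => 0
  | k+1 => if nc.getD k ' ' = 'O' ∨ nc.getD k ' ' = '#' then k + 1 else newPosA nc k

-- the `for i,tile in enumerate(col)` loop of tilt_north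
def placeA : List Char → Nat → List Char → List Char
  | nc, _, [] => nc
  | nc, i, c :: rest =>
    placeA (if c = 'O' then nc.set (newPosA nc i) 'O' else nc) (i + 1) rest

def tiltColA (col : List Char) : List Char := placeA (col.map dirtA) 0 col

def tiltNorthA (p : List (List Char)) : List (List Char) :=
  zipCols ((zipCols p).map tiltColA)

def rotateCW (p : List (List Char)) : List (List Char) := zipCols p.reverse

def spinA (p : List (List Char)) : List (List Char) :=
  rotateCW (tiltNorthA (rotateCW (tiltNorthA (rotateCW (tiltNorthA (rotateCW (tiltNorthA p)))))))

-- plat_to_str: '\n'.join(rows)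
def platKey : List (List Char) → List Char
  | [] => []
  | [r] => r
  | r :: rs => r ++ '\n' :: platKey rs

-- `for _ in range(remaining)` of A's tail loop
def repSpinA : Nat → List (List Char) → List (List Char)
  | 0, p => p
  | n + 1, p => repSpinA n (spinA p)

-- fuel bound for the while loops (the loop exits after at most 3^(R*C)+2 steps;
-- the fuel only totalises the recursion, it is never exhausted)
def pvFuel (p : List (List Char)) : Nat :=
  4 ^ (p.foldl (fun a r => a + r.length) (p.length + 1)) + 2

-- cycle found: remaining = (x - cycle_start) % cycle_size, then keep spinning
def exitA (x cs steps : Int) (p : List (List Char)) : List (List Char) :=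
  repSpinA (PySem.Int.mod (x - cs) (steps - cs)).toNat p

def loopA (x : Int) : Nat → PySem.Dict (List Char) Int → List (List Char) → Int → List (List Char)
  | 0, visited, p, steps =>
    match visited.get? (platKey p) with
    | some cs => exitA x cs steps p
    | none => p
  | f + 1, visited, p, steps =>
    match visited.get? (platKey p) with
    | some cs => exitA x cs steps p
    | none => loopA x f (visited.insert (platKey p) steps) (spinA p) (steps + 1)

def spin_x_cycles (platform : List String) (x : Int) : List String :=
  (loopA x (pvFuel (platform.map String.toList)) PySem.Dict.empty
      (platform.map String.toList) 0).map (fun r => String.ofList r)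

-- ===== PORT B =====

-- one-pass tilt: out pieces so far, o = rollers, d = gaps since the last '#'
def tiltStepB (s : List (List Char) × Nat × Nat) (c : Char) : List (List Char) × Nat × Nat :=
  if c = '#' then (s.1 ++ [List.replicate s.2.1 'O' ++ List.replicate s.2.2 '.' ++ ['#']], 0, 0)
  else if c = 'O' then (s.1, s.2.1 + 1, s.2.2)
  else (s.1, s.2.1, s.2.2 + 1)

def tiltColB (col : List Char) : List Char :=
  match col.foldl tiltStepB ([], 0, 0) with
  | (out, o, d) => (out ++ [List.replicate o 'O' ++ List.replicate d '.']).flatten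

def spinB (p : List (List Char)) : List (List Char) :=
  (List.range 4).foldl (fun q _ => rotateCW (zipCols ((zipCols q).map tiltColB))) p

-- cycle found: answer is a stored state, by direct index
def exitB (x start : Int) (states : List (List (List Char))) : List (List Char) :=
  states.getD (start + PySem.Int.mod (x - start) ((states.length : Int) - start)).toNat []

def loopB (x : Int) : Nat → PySem.Dict (List Char) Int → List (List (List Char)) → List (List Char) → List (List Char)
  | 0, seen, states, p =>
    match seen.get? (platKey p) with
    | some start => exitB x start states
    | none => p
  | f + 1, seen, states, p =>
    match seen.get? (platKey p) with
    | some start => exitB x start states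
    | none => loopB x f (seen.insert (platKey p) (states.length : Int)) (states ++ [p]) (spinB p)

def spin_x_cycles_alt (platform : List String) (x : Int) : List String :=
  (loopB x (pvFuel (platform.map String.toList)) PySem.Dict.empty []
      (platform.map String.toList)).map (fun r => String.ofList r)

-- ===== PRECONDITION & SPEC =====
-- Pre_ excludes exactly the non-rectangular platforms, on which A's zip(..., strict=True)
-- raises ValueError.
def Pre_spin_x_cycles (platform : List String) (x : Int) : Prop :=
  ∀ r ∈ platform, r.toList.length = (platform.headD "").toList.length
instance (platform : List String) (x : Int) : Decidable (Pre_spin_x_cycles platform x) := by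
  unfold Pre_spin_x_cycles; infer_instance

def pvWitness_spin_x_cycles : List String × Int := (["O.", "#."], 3)

-- On the single input platform=[''] (any x), A's newline-joined state key '' collides with
-- the key of the empty platform [], so A returns []; B, indexing the stored states, returns
-- [''] — the platform unchanged by any number of spins, which is the intended fixed point.
def D_spin_x_cycles (platform : List String) (x : Int) : Prop := platform = [""]
instance (platform : List String) (x : Int) : Decidable (D_spin_x_cycles platform x) := by
  unfold D_spin_x_cycles; infer_instance

def Spec_spin_x_cycles (platform : List String) (x : Int) (out : List String) : Prop :=
  ¬ D_spin_x_cycles platform x → out = spin_x_cycles_alt platform x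
instance (platform : List String) (x : Int) (out : List String) :
    Decidable (Spec_spin_x_cycles platform x out) := by
  unfold Spec_spin_x_cycles; infer_instance

def pvDiffWitness_spin_x_cycles : List String × Int := ([""], 5)
def pvDiffWitnessOut_spin_x_cycles : (List String) × (List String) := ([], [""])

-- ===== CLAIM (what is proved, stated in full; the proofs are below) =====
def Claim_unchanged_spin_x_cycles : Prop := ∀ (platform : List String) (x : Int), Dom_spin_x_cycles platform x → Pre_spin_x_cycles platform x → Spec_spin_x_cycles platform x (spin_x_cycles platform x)
def Claim_changed_spin_x_cycles : Prop := Dom_spin_x_cycles (pvDiffWitness_spin_x_cycles.1) (pvDiffWitness_spin_x_cycles.2) ∧ Pre_spin_x_cycles (pvDiffWitness_spin_x_cycles.1) (pvDiffWitness_spin_x_cycles.2) ∧ D_spin_x_cycles (pvDiffWitness_spin_x_cycles.1) (pvDiffWitness_spin_x_cycles.2) ∧ spin_x_cycles (pvDiffWitness_spin_x_cycles.1) (pvDiffWitness_spin_x_cycles.2) = pvDiffWitnessOut_spin_x_cycles.1 ∧ spin_x_cycles_alt (pvDiffWitness_spin_x_cycles.1) (pvDiffWitness_spin_x_cycles.2)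 = pvDiffWitnessOut_spin_x_cycles.2 ∧ pvDiffWitnessOut_spin_x_cycles.1 ≠ pvDiffWitnessOut_spin_x_cycles.2
def Claim_exact_spin_x_cycles : Prop := ∀ (platform : List String) (x : Int), Dom_spin_x_cycles platform x → Pre_spin_x_cycles platform x → D_spin_x_cycles platform x → spin_x_cycles platform x ≠ spin_x_cycles_alt platform x

-- ===== LEMMAS AND PROOFS =====

-- ---- phase 1: the two one-column tilts agree ----

/-- flattened version of B's fold state -/
def flatSt (s : List Char × Nat × Nat) : List Char :=
  s.1 ++ List.replicate s.2.1 'O' ++ List.replicate s.2.2 '.'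

/-- B's step on the flattened state -/
def stepF (s : List Char × Nat × Nat) (c : Char) : List Char × Nat × Nat :=
  if c = '#' then (s.1 ++ List.replicate s.2.1 'O' ++ List.replicate s.2.2 '.' ++ ['#'], 0, 0)
  else if c = 'O' then (s.1, s.2.1 + 1, s.2.2)
  else (s.1, s.2.1, s.2.2 + 1)

lemma foldB_flat : ∀ (col : List Char) (out : List (List Char)) (o d : Nat),
    (out ++ [List.replicate o 'O' ++ List.replicate d '.']).flatten = flatSt (out.flatten, o, d) →
    ((col.foldl tiltStepB (out, o, d)).1 ++
        [List.replicate (col.foldl tiltStepB (out, o, d)).2.1 'O' ++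
         List.replicate (col.foldl tiltStepB (out, o, d)).2.2 '.']).flatten
      = flatSt (col.foldl stepF (out.flatten, o, d)) := by
  intro col
  induction col with
  | nil => intro out o d h; simpa using h
  | cons c cs ih =>
    intro out o d _
    simp only [List.foldl_cons]
    by_cases h1 : c = '#'
    · simp only [tiltStepB, stepF, h1, if_pos rfl]
      have := ih (out ++ [List.replicate o 'O' ++ List.replicate d '.' ++ ['#']]) 0 0
        (by simp [flatSt])
      simpa [flatSt, List.append_assoc] using this
    · by_cases h2 : c = 'O'
      · simp only [tiltStepB, stepF, h1, h2, if_neg, if_pos rfl, reduceIte]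
        exact ih out (o+1) d (by simp [flatSt])
      · simp only [tiltStepB, stepF, h1, h2, reduceIte]
        exact ih out o (d+1) (by simp [flatSt])

lemma tiltColB_flat (col : List Char) :
    tiltColB col = flatSt (col.foldl stepF ([], 0, 0)) := by
  have := foldB_flat col [] 0 0 (by simp [flatSt])
  simpa [tiltColB] using this

/-- the backward rescan returns `b` when everything in [b, j) is free and b-1 (if any) blocks -/
lemma newPosA_eq (nc : List Char) :
    ∀ (j b : Nat), b ≤ j →
    (∀ k, b ≤ k → k < j → ¬(nc.getD k ' ' = 'O' ∨ nc.getD k ' ' = '#')) →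
    (b = 0 ∨ (nc.getD (b-1) ' ' = 'O' ∨ nc.getD (b-1) ' ' = '#')) →
    newPosA nc j = b := by
  intro j
  induction j with
  | zero =>
    intro b hb _ _
    have : b = 0 := by omega
    simp [newPosA, this]
  | succ k ih =>
    intro b hb hfree hblock
    by_cases hbk : b = k + 1
    · subst hbk
      rcases hblock with h0 | hbl
      · omega
      · simp only [newPosA]
        rw [if_pos (by simpa using hbl)]
    · have hble : b ≤ k := by omega
      have hnf := hfree k hble (by omega)
      simp only [newPosA]
      rw [if_neg hnf]
      exact ih b hble (fun m h1 h2 => hfree m h1 (by omega)) hblock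

lemma rep_snoc_cons (n : Nat) (a : Char) (l : List Char) :
    List.replicate n a ++ a :: l = List.replicate (n+1) a ++ l := by
  rw [List.replicate_succ']; simp

lemma placeA_cons (nc : List Char) (i : Nat) (c : Char) (rest : List Char) :
    placeA nc i (c :: rest)
      = placeA (if c = 'O' then nc.set (newPosA nc i) 'O' else nc) (i+1) rest := rfl

/-- main invariant: A's placement loop builds exactly B's counting fold -/
lemma placeA_inv : ∀ (suf done : List Char) (o d : Nat),
    (done = [] ∨ ∃ w, done = w ++ ['#']) →
    placeA (done ++ (List.replicate o 'O' ++ (List.replicate d '.' ++ suf.map dirtA)))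
           (done.length + o + d) suf
      = flatSt (suf.foldl stepF (done, o, d)) := by
  intro suf
  induction suf with
  | nil => intro done o d _; simp [placeA, flatSt]
  | cons c rest ih =>
    intro done o d hend
    rw [List.map_cons, placeA_cons]
    by_cases h1 : c = '#'
    · subst h1
      rw [if_neg (by decide), List.foldl_cons]
      have harr : done ++ (List.replicate o 'O' ++ (List.replicate d '.' ++ (dirtA '#' :: rest.map dirtA)))
          = (done ++ List.replicate o 'O' ++ List.replicate d '.' ++ ['#'])
            ++ (List.replicate 0 'O' ++ (List.replicate 0 '.' ++ rest.map dirtA)) := by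
        simp [dirtA]
      have hstep : stepF (done, o, d) '#'
          = (done ++ List.replicate o 'O' ++ List.replicate d '.' ++ ['#'], 0, 0) := by
        simp [stepF]
      have hlen : done.length + o + d + 1
          = (done ++ List.replicate o 'O' ++ List.replicate d '.' ++ ['#']).length + 0 + 0 := by
        simp; omega
      rw [harr, hlen, hstep]
      exact ih _ 0 0 (Or.inr ⟨_, rfl⟩)
    · by_cases h2 : c = 'O'
      · subst h2
        rw [if_pos rfl, List.foldl_cons]
        have hd : dirtA 'O' = '.' := by decide
        have hgrp : done ++ (List.replicate o 'O' ++ (List.replicate d '.' ++ (dirtA 'O' :: rest.map dirtA)))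
            = (done ++ List.replicate o 'O') ++ (List.replicate (d+1) '.' ++ rest.map dirtA) := by
          rw [hd]
          simp only [List.append_assoc]
          rw [rep_snoc_cons]
        rw [hgrp]
        have hpos : newPosA ((done ++ List.replicate o 'O')
              ++ (List.replicate (d+1) '.' ++ rest.map dirtA)) (done.length + o + d)
            = done.length + o := by
          apply newPosA_eq
          · omega
          · intro k hk1 hk2
            have hk' : (done ++ List.replicate o 'O').length ≤ k := by simp; omega
            rw [List.getD_append_right _ _ _ _ hk']
            rw [List.getD_append _ _ _ _ (by simp; omega)]
            have hb : k - (done.length + o) < d + 1 := by omega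
            simp [List.getElem?_replicate, hb]
          · rcases Nat.eq_zero_or_pos o with ho | ho
            · subst ho
              rcases hend with hdone | ⟨w, hw⟩
              · left; simp [hdone]
              · right; right
                subst hw
                have he : (w ++ ['#']).length + 0 - 1 = w.length := by simp
                rw [he]
                rw [List.getD_append _ _ _ _ (by simp)]
                rw [List.getD_append _ _ _ _ (by simp)]
                rw [List.getD_append_right _ _ _ _ (le_refl _)]
                simp
            · right; left
              have hk : done.length + o - 1 < (done ++ List.replicate o 'O').length := by
                simp; omega
              rw [List.getD_append _ _ _ _ hk]
              have hk2 : done.length ≤ done.length + o - 1 := by omega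
              rw [List.getD_append_right _ _ _ _ hk2]
              have hk3 : done.length + o - 1 - done.length < o := by omega
              simp [hk3]
        rw [hpos]
        have hset : ((done ++ List.replicate o 'O')
              ++ (List.replicate (d+1) '.' ++ rest.map dirtA)).set (done.length + o) 'O'
            = done ++ (List.replicate (o+1) 'O' ++ (List.replicate d '.' ++ rest.map dirtA)) := by
          rw [show done.length + o = (done ++ List.replicate o 'O').length by simp]
          rw [show ((done ++ List.replicate o 'O')
                ++ (List.replicate (d+1) '.' ++ rest.map dirtA)).set
                  (done ++ List.replicate o 'O').length 'O'
              = (done ++ List.replicate o 'O')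
                ++ ((List.replicate (d+1) '.' ++ rest.map dirtA).set 0 'O') from by
            simp [List.set_append]]
          rw [List.replicate_succ, List.cons_append, List.set_cons_zero,
            List.append_assoc, rep_snoc_cons]
        rw [hset]
        have hlen2 : done.length + o + d + 1 = done.length + (o+1) + d := by omega
        rw [hlen2]
        have hstep : stepF (done, o, d) 'O' = (done, o+1, d) := by simp [stepF]
        rw [hstep]
        exact ih done (o+1) d hend
      · rw [if_neg h2, List.foldl_cons]
        have hd : dirtA c = '.' := by simp [dirtA, h1]
        have harr : done ++ (List.replicate o 'O' ++ (List.replicate d '.' ++ (dirtA c :: rest.map dirtA)))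
            = done ++ (List.replicate o 'O' ++ (List.replicate (d+1) '.' ++ rest.map dirtA)) := by
          rw [hd]; congr 1; congr 1; rw [rep_snoc_cons]
        have hlen2 : done.length + o + d + 1 = done.length + o + (d+1) := by omega
        have hstep : stepF (done, o, d) c = (done, o, d+1) := by simp [stepF, h1, h2]
        rw [harr, hlen2, hstep]
        exact ih done o (d+1) hend

theorem tiltCol_eq (col : List Char) : tiltColA col = tiltColB col := by
  have h := placeA_inv col [] 0 0 (Or.inl rfl)
  simpa [tiltColA, tiltColB_flat col] using h

theorem spinB_eq_spinA (p : List (List Char)) : spinB p = spinA p := by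
  have h : tiltColB = tiltColA := funext fun c => (tiltCol_eq c).symm
  rw [spinB, h]
  have h4 : List.range 4 = [0, 1, 2, 3] := rfl
  rw [h4]
  simp only [List.foldl_cons, List.foldl_nil]
  simp only [spinA, tiltNorthA]

-- ---- phase 2: iteration bookkeeping ----

lemma rep_succ_out (n : Nat) (p : List (List Char)) :
    repSpinA (n+1) p = spinA (repSpinA n p) := by
  induction n generalizing p with
  | zero => rfl
  | succ k ih => rw [repSpinA, ih, repSpinA]

lemma rep_add (a b : Nat) (p : List (List Char)) :
    repSpinA a (repSpinA b p) = repSpinA (b + a) p := by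
  induction b generalizing p with
  | zero => simp [repSpinA]
  | succ k ih =>
    rw [repSpinA, ih]
    have h : k + 1 + a = (k + a) + 1 := by omega
    conv_rhs => rw [h, repSpinA]

-- ---- phase 3: purity of spin outputs and key injectivity ----

def GoodP (q : List (List Char)) : Prop :=
  ∀ r ∈ q, r ≠ [] ∧ ∀ c ∈ r, c = 'O' ∨ c = '#' ∨ c = '.'

lemma zip_rows_nonempty : ∀ (n : Nat) (rows : List (List Char)) (r : List Char),
    r ∈ zipColsAux n rows → r ≠ [] := by
  intro n
  induction n with
  | zero => intro rows r h; simp [zipColsAux] at h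
  | succ k ih =>
    intro rows r h
    rw [zipColsAux] at h
    split at h
    · simp at h
    · rename_i hc
      rcases List.mem_cons.mp h with h | h
      · subst h
        have hne : rows ≠ [] := by
          intro he; subst he; simp at hc
        cases rows with
        | nil => exact absurd rfl hne
        | cons a as => simp
      · exact ih _ _ h

lemma zip_chars : ∀ (n : Nat) (rows : List (List Char)) (r : List Char) (c : Char),
    r ∈ zipColsAux n rows → c ∈ r → ∃ r' ∈ rows, c ∈ r' := by
  intro n
  induction n with
  | zero => intro rows r c h; simp [zipColsAux] at h
  | succ k ih =>
    intro rows r c h hc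
    rw [zipColsAux] at h
    split at h
    · simp at h
    · rename_i hcond
      rcases List.mem_cons.mp h with h | h
      · subst h
        rcases List.mem_map.mp hc with ⟨r', hr', hc'⟩
        refine ⟨r', hr', ?_⟩
        cases r' with
        | nil =>
          exfalso
          have hany : rows.any (·.isEmpty) = true := List.any_eq_true.mpr ⟨[], hr', rfl⟩
          simp [hany] at hcond
        | cons a as => subst hc'; simp
      · rcases ih _ _ _ h hc with ⟨r', hr', hc'⟩
        rcases List.mem_map.mp hr' with ⟨r'', hr'', ht⟩
        exact ⟨r'', hr'', List.mem_of_mem_tail (ht ▸ hc')⟩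

lemma zipCols_rows_nonempty (rows : List (List Char)) (r : List Char)
    (h : r ∈ zipCols rows) : r ≠ [] := zip_rows_nonempty _ _ _ h

lemma zipCols_chars (rows : List (List Char)) (r : List Char) (c : Char)
    (h : r ∈ zipCols rows) (hc : c ∈ r) : ∃ r' ∈ rows, c ∈ r' := zip_chars _ _ _ _ h hc

lemma stepF_chars : ∀ (col : List Char) (st : List Char × Nat × Nat),
    (∀ c ∈ st.1, c = 'O' ∨ c = '#' ∨ c = '.') →
    ∀ c ∈ flatSt (col.foldl stepF st), c = 'O' ∨ c = '#' ∨ c = '.' := by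
  intro col
  induction col with
  | nil =>
    intro st hst c hc
    simp only [flatSt, List.foldl_nil, List.mem_append] at hc
    rcases hc with (hc | hc) | hc
    · exact hst c hc
    · left; exact List.eq_of_mem_replicate hc
    · right; right; exact List.eq_of_mem_replicate hc
  | cons a as ih =>
    intro st hst c hc
    rw [List.foldl_cons] at hc
    refine ih (stepF st a) ?_ c hc
    intro x hx
    simp only [stepF] at hx
    split at hx
    · simp only [List.mem_append, List.mem_singleton] at hx
      rcases hx with ((hx | hx) | hx) | hx
      · exact hst x hx
      · left; exact List.eq_of_mem_replicate hx
      · right; right; exact List.eq_of_mem_replicate hx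
      · right; left; exact hx
    · split at hx <;> exact hst x hx

lemma tiltColB_chars (col : List Char) (c : Char) (h : c ∈ tiltColB col) :
    c = 'O' ∨ c = '#' ∨ c = '.' := by
  rw [tiltColB_flat] at h
  exact stepF_chars col ([], 0, 0) (by simp) c h

lemma spinA_good (p : List (List Char)) : GoodP (spinA p) := by
  intro r hr
  have hr' : r ∈ zipCols (tiltNorthA (rotateCW (tiltNorthA (rotateCW (tiltNorthA (rotateCW (tiltNorthA p))))))).reverse := hr
  constructor
  · exact zipCols_rows_nonempty _ _ hr'
  · intro c hc
    rcases zipCols_chars _ _ _ hr' hc with ⟨r1, hr1, hc1⟩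
    rw [List.mem_reverse] at hr1
    rw [tiltNorthA] at hr1
    rcases zipCols_chars _ _ _ hr1 hc1 with ⟨r2, hr2, hc2⟩
    rcases List.mem_map.mp hr2 with ⟨r3, _, ht⟩
    subst ht
    rw [tiltCol_eq] at hc2
    exact tiltColB_chars _ _ hc2

-- separator-tail of platKey
lemma platKey_cons (r : List Char) (rs : List (List Char)) :
    platKey (r :: rs) = r ++ (if rs = [] then [] else '\n' :: platKey rs) := by
  cases rs <;> simp [platKey]

/-- splitting a '\n'-free prefix off a key -/
lemma split_nl : ∀ (a b s t : List Char), '\n' ∉ a → '\n' ∉ b →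
    (s = [] ∨ ∃ u, s = '\n' :: u) → (t = [] ∨ ∃ u, t = '\n' :: u) →
    a ++ s = b ++ t → a = b ∧ s = t := by
  intro a
  induction a with
  | nil =>
    intro b s t _ hb hs ht h
    cases b with
    | nil => exact ⟨rfl, h⟩
    | cons c b' =>
      simp only [List.nil_append, List.cons_append] at h
      rcases hs with hs | ⟨u, hu⟩
      · simp [hs] at h
      · rw [hu] at h
        injection h with h1 _
        subst h1
        simp at hb
  | cons c a' ih =>
    intro b s t ha hb hs ht h
    cases b with
    | nil =>
      simp only [List.cons_append, List.nil_append] at h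
      rcases ht with ht' | ⟨u, hu⟩
      · simp [ht'] at h
      · rw [hu] at h
        injection h with h1 _
        subst h1
        simp at ha
    | cons c' b' =>
      simp only [List.cons_append] at h
      injection h with h1 h2
      have := ih b' s t (by simp at ha; exact ha.2) (by simp at hb; exact hb.2) hs ht h2
      exact ⟨by rw [h1, this.1], this.2⟩

lemma key_inj_good : ∀ (p q : List (List Char)),
    (∀ r ∈ p, r ≠ [] ∧ '\n' ∉ r) → (∀ r ∈ q, r ≠ [] ∧ '\n' ∉ r) →
    platKey p = platKey q → p = q := by
  intro p
  induction p with
  | nil =>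
    intro q _ hq h
    cases q with
    | nil => rfl
    | cons b bs =>
      rw [platKey_cons] at h
      have hb := (hq b (by simp)).1
      simp only [platKey] at h
      exact absurd h.symm (by simp [hb])
  | cons a as ih =>
    intro q hp hq h
    cases q with
    | nil =>
      rw [platKey_cons] at h
      have ha := (hp a (by simp)).1
      simp only [platKey] at h
      exact absurd h (by simp [ha])
    | cons b bs =>
      rw [platKey_cons, platKey_cons] at h
      have hsplit := split_nl a b _ _ (hp a (by simp)).2 (hq b (by simp)).2
        (by split <;> simp) (by split <;> simp) h
      have hab := hsplit.1
      have hst := hsplit.2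
      cases as with
      | nil =>
        cases bs with
        | nil => rw [hab]
        | cons b' bs' => simp at hst
      | cons a' as' =>
        cases bs with
        | nil => simp at hst
        | cons b' bs' =>
          rw [if_neg (List.cons_ne_nil _ _), if_neg (List.cons_ne_nil _ _)] at hst
          injection hst with _ hst2
          have := ih (b' :: bs') (fun r hr => hp r (by simp [hr]))
            (fun r hr => hq r (by simp [hr])) hst2
          rw [hab, this]

lemma key_ne_good_nl (q : List (List Char)) (hq : GoodP q) (l : List Char) :
    platKey q ≠ '\n' :: l := by
  cases q with
  | nil => simp [platKey]
  | cons r rs =>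
    rw [platKey_cons]
    obtain ⟨hne, hch⟩ := hq r (by simp)
    cases r with
    | nil => exact absurd rfl hne
    | cons c r' =>
      have := hch c (by simp)
      simp only [List.cons_append, ne_eq, List.cons.injEq, not_and]
      intro hc
      rcases this with h | h | h <;> simp [h] at hc

lemma good_nlfree (q : List (List Char)) (hq : GoodP q) :
    ∀ r ∈ q, r ≠ [] ∧ '\n' ∉ r := by
  intro r hr
  obtain ⟨h1, h2⟩ := hq r hr
  refine ⟨h1, fun hc => ?_⟩
  rcases h2 '\n' hc with h | h | h <;> simp at h

-- ---- shape preservation: spin keeps an R x C grid an R x C grid ----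

lemma zipAux_shape : ∀ (C n : Nat) (rows : List (List Char)),
    (∀ r ∈ rows, r.length = C) → rows ≠ [] → C ≤ n →
    (zipColsAux n rows).length = C ∧ ∀ r' ∈ zipColsAux n rows, r'.length = rows.length := by
  intro C
  induction C with
  | zero =>
    intro n rows hC hne _
    have hz : zipColsAux n rows = [] := by
      cases n with
      | zero => rfl
      | succ m =>
        rw [zipColsAux]
        cases rows with
        | nil => exact absurd rfl hne
        | cons a as =>
          rw [if_pos ?_]
          have ha : a = [] := List.eq_nil_of_length_eq_zero (hC a (by simp))
          simp [ha]
    simp [hz]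
  | succ c ih =>
    intro n rows hC hne hle
    cases n with
    | zero => omega
    | succ m =>
      rw [zipColsAux]
      rw [if_neg ?_]
      · have htl : ∀ r ∈ rows.map (·.tail), r.length = c := by
          intro r hr
          rcases List.mem_map.mp hr with ⟨r0, hr0, ht⟩
          have := hC r0 hr0
          rw [← ht]
          simp [this]
        have hrec := ih m (rows.map (·.tail)) htl (by simpa using hne) (by omega)
        refine ⟨by simp [hrec.1], ?_⟩
        intro r' hr'
        rcases List.mem_cons.mp hr' with h | h
        · simp [h]
        · rw [hrec.2 r' h]; simp
      · intro hcon
        rcases Bool.or_eq_true_iff.mp hcon with h | h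
        · rw [List.isEmpty_iff] at h; exact hne h
        · rcases List.any_eq_true.mp h with ⟨r, hr, hemp⟩
          rw [List.isEmpty_iff] at hemp
          have := hC r hr
          rw [hemp] at this
          simp at this

lemma zipCols_shape (rows : List (List Char)) (C : Nat)
    (hC : ∀ r ∈ rows, r.length = C) (hne : rows ≠ []) :
    (zipCols rows).length = C ∧ ∀ r' ∈ zipCols rows, r'.length = rows.length := by
  unfold zipCols
  cases rows with
  | nil => exact absurd rfl hne
  | cons a as =>
    have ha : a.length = C := hC a (by simp)
    rw [List.headD_cons, ha]
    exact zipAux_shape C C (a :: as) hC hne (le_refl C)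

lemma placeA_len : ∀ (suf nc : List Char) (i : Nat), (placeA nc i suf).length = nc.length := by
  intro suf
  induction suf with
  | nil => intro nc i; rfl
  | cons c rest ih =>
    intro nc i
    rw [placeA_cons, ih]
    split <;> simp

lemma tiltColA_len (col : List Char) : (tiltColA col).length = col.length := by
  rw [tiltColA, placeA_len]; simp

lemma tiltNorthA_shape (p : List (List Char)) (R C : Nat) (hR1 : 1 ≤ R) (hC1 : 1 ≤ C)
    (hR : p.length = R) (hC : ∀ r ∈ p, r.length = C) :
    (tiltNorthA p).length = R ∧ ∀ r ∈ tiltNorthA p, r.length = C := by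
  have h1 := zipCols_shape p C hC (by intro h; rw [h] at hR; simp at hR; omega)
  have h2 : ((zipCols p).map tiltColA).length = C := by simp [h1.1]
  have h3 : ∀ r ∈ (zipCols p).map tiltColA, r.length = R := by
    intro r hr
    rcases List.mem_map.mp hr with ⟨r0, hr0, ht⟩
    rw [← ht, tiltColA_len, h1.2 r0 hr0, hR]
  have h4 := zipCols_shape _ R h3 (by intro h; rw [h] at h2; simp at h2; omega)
  rw [tiltNorthA]
  exact ⟨by rw [h4.1], by intro r hr; rw [h4.2 r hr, h2]⟩

lemma rotateCW_shape (p : List (List Char)) (R C : Nat) (hR1 : 1 ≤ R)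
    (hR : p.length = R) (hC : ∀ r ∈ p, r.length = C) :
    (rotateCW p).length = C ∧ ∀ r ∈ rotateCW p, r.length = R := by
  have h1 := zipCols_shape p.reverse C (by intro r hr; exact hC r (List.mem_reverse.mp hr))
    (by intro h; rw [List.reverse_eq_nil_iff] at h; rw [h] at hR; simp at hR; omega)
  rw [rotateCW]
  exact ⟨h1.1, by intro r hr; rw [h1.2 r hr]; simp [hR]⟩

lemma spinA_shape (p : List (List Char)) (R C : Nat) (hR1 : 1 ≤ R) (hC1 : 1 ≤ C)
    (hR : p.length = R) (hC : ∀ r ∈ p, r.length = C) :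
    (spinA p).length = R ∧ ∀ r ∈ spinA p, r.length = C := by
  have t1 := tiltNorthA_shape p R C hR1 hC1 hR hC
  have r1 := rotateCW_shape _ R C hR1 t1.1 t1.2
  have t2 := tiltNorthA_shape _ C R hC1 hR1 r1.1 r1.2
  have r2 := rotateCW_shape _ C R hC1 t2.1 t2.2
  have t3 := tiltNorthA_shape _ R C hR1 hC1 r2.1 r2.2
  have r3 := rotateCW_shape _ R C hR1 t3.1 t3.2
  have t4 := tiltNorthA_shape _ C R hC1 hR1 r3.1 r3.2
  have r4 := rotateCW_shape _ C R hC1 t4.1 t4.2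
  rw [spinA]
  exact r4

lemma rep_shape (p0 : List (List Char)) (R C : Nat) (hR1 : 1 ≤ R) (hC1 : 1 ≤ C)
    (hR : p0.length = R) (hC : ∀ r ∈ p0, r.length = C) :
    ∀ j : Nat, (repSpinA j p0).length = R ∧ ∀ r ∈ repSpinA j p0, r.length = C := by
  intro j
  induction j with
  | zero => exact ⟨hR, hC⟩
  | succ k ih =>
    rw [rep_succ_out]
    exact spinA_shape _ R C hR1 hC1 ih.1 ih.2

-- counting '\n' in a key: separators plus whatever the rows contain
lemma key_count : ∀ (p : List (List Char)), p ≠ [] →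
    (platKey p).count '\n' = p.length - 1 + (p.map (fun r => r.count '\n')).sum := by
  intro p
  induction p with
  | nil => intro h; exact absurd rfl h
  | cons a as ih =>
    intro _
    cases as with
    | nil => simp [platKey]
    | cons b bs =>
      have hkey : platKey (a :: b :: bs) = a ++ '\n' :: platKey (b :: bs) := rfl
      rw [hkey, List.count_append, List.count_cons_self, ih (by simp)]
      have h1 : 1 ≤ (b :: bs).length := by simp
      simp only [List.map_cons, List.length_cons, List.sum_cons]
      omega

-- ---- phase 4: the two while loops agree ----

lemma loop_eq (x : Int) (p0 : List (List Char))
    (hinj : ∀ i j : Nat, platKey (repSpinA i p0) = platKey (repSpinA j p0) →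
        repSpinA i p0 = repSpinA j p0) :
    ∀ (fuel n : Nat) (d : PySem.Dict (List Char) Int) (states : List (List (List Char))),
    states = (List.range n).map (fun i => repSpinA i p0) →
    (∀ k v, d.get? k = some v ↔ ∃ i : Nat, i < n ∧ v = (i : Int) ∧ k = platKey (repSpinA i p0)) →
    loopA x fuel d (repSpinA n p0) (n : Int) = loopB x fuel d states (repSpinA n p0) := by
  intro fuel
  induction fuel with
  | zero =>
    intro n d states hst hd
    rw [loopA, loopB]
    cases hget : d.get? (platKey (repSpinA n p0)) with
    | none => rfl
    | some cs =>
      rcases (hd _ _).mp hget with ⟨i, hin, hv, hk⟩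
      subst hv
      dsimp only
      unfold exitA exitB
      have hrep : repSpinA i p0 = repSpinA n p0 := hinj i n hk.symm
      have hlen : states.length = n := by rw [hst]; simp
      have hper : (0 : Int) < (n : Int) - (i : Int) := by
        omega
      have hm1 : 0 ≤ PySem.Int.mod (x - i) ((n : Int) - i) := PySem.Int.mod_nonneg _ hper
      have hm2 : PySem.Int.mod (x - i) ((n : Int) - i) < (n : Int) - i := PySem.Int.mod_lt _ hper
      rw [hlen]
      have hidx : ((i : Int) + PySem.Int.mod (x - i) ((n : Int) - i)).toNat
          = i + (PySem.Int.mod (x - i) ((n : Int) - i)).toNat := by omega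
      rw [hidx]
      have hlt : i + (PySem.Int.mod (x - i) ((n : Int) - i)).toNat < n := by omega
      have hgd : states.getD (i + (PySem.Int.mod (x - i) ((n : Int) - i)).toNat) []
          = repSpinA (i + (PySem.Int.mod (x - i) ((n : Int) - i)).toNat) p0 := by
        rw [hst]
        rw [List.getD_eq_getElem?_getD]
        simp [List.getElem?_map, List.getElem?_range, hlt]
      rw [hgd, ← hrep, rep_add]
  | succ f ih =>
    intro n d states hst hd
    rw [loopA, loopB]
    cases hget : d.get? (platKey (repSpinA n p0)) with
    | some cs =>
      rcases (hd _ _).mp hget with ⟨i, hin, hv, hk⟩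
      subst hv
      dsimp only
      unfold exitA exitB
      have hrep : repSpinA i p0 = repSpinA n p0 := hinj i n hk.symm
      have hlen : states.length = n := by rw [hst]; simp
      have hper : (0 : Int) < (n : Int) - (i : Int) := by omega
      have hm1 : 0 ≤ PySem.Int.mod (x - i) ((n : Int) - i) := PySem.Int.mod_nonneg _ hper
      have hm2 : PySem.Int.mod (x - i) ((n : Int) - i) < (n : Int) - i := PySem.Int.mod_lt _ hper
      rw [hlen]
      have hidx : ((i : Int) + PySem.Int.mod (x - i) ((n : Int) - i)).toNat
          = i + (PySem.Int.mod (x - i) ((n : Int) - i)).toNat := by omega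
      rw [hidx]
      have hlt : i + (PySem.Int.mod (x - i) ((n : Int) - i)).toNat < n := by omega
      have hgd : states.getD (i + (PySem.Int.mod (x - i) ((n : Int) - i)).toNat) []
          = repSpinA (i + (PySem.Int.mod (x - i) ((n : Int) - i)).toNat) p0 := by
        rw [hst]
        rw [List.getD_eq_getElem?_getD]
        simp [List.getElem?_map, List.getElem?_range, hlt]
      rw [hgd, ← hrep, rep_add]
    | none =>
      rw [spinB_eq_spinA]
      have hlen : states.length = n := by rw [hst]; simp
      have hsteps : (n : Int) + 1 = ((n + 1 : Nat) : Int) := by omega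
      rw [hlen, hsteps]
      have hspin : spinA (repSpinA n p0) = repSpinA (n+1) p0 := (rep_succ_out n p0).symm
      rw [hspin]
      have hst' : states ++ [repSpinA n p0] = (List.range (n+1)).map (fun i => repSpinA i p0) := by
        rw [hst, List.range_succ]; simp
      refine ih (n+1) _ _ hst' ?_
      intro k v
      rw [PySem.Dict.get?_insert]
      constructor
      · intro h
        split at h
        · rename_i hk
          injection h with h
          exact ⟨n, by omega, h.symm, hk⟩
        · rcases (hd _ _).mp h with ⟨i, hi, hv, hk⟩
          exact ⟨i, by omega, hv, hk⟩
      · rintro ⟨i, hi, hv, hk⟩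
        rcases Nat.lt_succ_iff_lt_or_eq.mp hi with hi' | hi'
        · split
          · rename_i hke
            -- k is the new key but also an old one: old dict would have found it
            exfalso
            have : d.get? (platKey (repSpinA n p0)) = some (i : Int) := by
              rw [(hd _ _)]
              exact ⟨i, hi', rfl, by rw [← hke, hk]⟩
            rw [hget] at this; exact absurd this (by simp)
          · exact (hd _ _).mpr ⟨i, hi', hv, hk⟩
        · subst hi'
          rw [if_pos hk, hv]

-- ---- phase 5: assembling the top-level theorem ----

lemma key_inj_all (p0 : List (List Char))
    (hcase : p0 = [] ∨ ((∀ r ∈ p0, r = []) ∧ 2 ≤ p0.length) ∨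
      (∃ C, 1 ≤ C ∧ p0 ≠ [] ∧ ∀ r ∈ p0, r.length = C)) :
    ∀ i j : Nat, platKey (repSpinA i p0) = platKey (repSpinA j p0) →
      repSpinA i p0 = repSpinA j p0 := by
  -- every positive iterate is a spin output, hence GoodP
  have hgood : ∀ i : Nat, 0 < i → GoodP (repSpinA i p0) := by
    intro i hi
    cases i with
    | zero => omega
    | succ k => rw [rep_succ_out]; exact spinA_good _
  have hnl : ∀ i : Nat, 0 < i → ∀ r ∈ repSpinA i p0, r ≠ [] ∧ '\n' ∉ r :=
    fun i hi => good_nlfree _ (hgood i hi)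
  -- the key collision of p0 with a positive iterate forces p0's rows to be '\n'-free
  have hmain : ∀ j : Nat, 0 < j → platKey p0 = platKey (repSpinA j p0) →
      p0 = repSpinA j p0 := by
    intro j hj hk
    rcases hcase with h0 | h0 | h0
    · -- p0 = []
      exact key_inj_good _ _ (by simp [h0]) (hnl j hj) hk
    · -- all rows empty, at least 2 of them: key starts with '\n', impossible for a spin output
      exfalso
      obtain ⟨hempty, hlen⟩ := h0
      cases p0 with
      | nil => simp at hlen
      | cons r rs =>
        have hr : r = [] := hempty r (by simp)
        cases rs with
        | nil => simp at hlen
        | cons r' rs' =>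
          have hkey : platKey (r :: r' :: rs') = '\n' :: platKey (r' :: rs') := by
            rw [platKey_cons, hr]; simp
          rw [hkey] at hk
          exact key_ne_good_nl _ (hgood j hj) _ hk.symm
    · -- rectangular with nonempty rows: counting '\n' in the equal keys
      obtain ⟨C, hC1, hne, hCall⟩ := h0
      have hR1 : 1 ≤ p0.length := List.length_pos_iff.mpr hne
      have hshape := rep_shape p0 p0.length C hR1 hC1 rfl hCall j
      have hqne : repSpinA j p0 ≠ [] := by
        intro h
        have hl := hshape.1
        rw [h] at hl
        simp at hl
        omega
      have hqnl := good_nlfree _ (hgood j hj)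
      have hc0 : (platKey (repSpinA j p0)).count '\n' = p0.length - 1 := by
        rw [key_count _ hqne]
        have hsum0 : ((repSpinA j p0).map (fun r => r.count '\n')).sum = 0 := by
          rw [List.sum_eq_zero_iff]
          intro x hx
          rcases List.mem_map.mp hx with ⟨r, hr, hxx⟩
          rw [← hxx, List.count_eq_zero]
          exact (hqnl r hr).2
        rw [hsum0, hshape.1]
        omega
      have hp0nl : ∀ r ∈ p0, '\n' ∉ r := by
        have h1 : (platKey p0).count '\n'
            = p0.length - 1 + (p0.map (fun r => r.count '\n')).sum := key_count _ hne
        have h2 : (platKey p0).count '\n' = p0.length - 1 := by rw [hk, hc0]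
        have hsum : (p0.map (fun r => r.count '\n')).sum = 0 := by omega
        intro r hr
        rw [← List.count_eq_zero (a := '\n')]
        exact List.sum_eq_zero_iff.mp hsum _ (List.mem_map_of_mem hr)
      refine key_inj_good _ _ (fun r hr => ⟨?_, hp0nl r hr⟩) hqnl hk
      intro hcon
      have := hCall r hr
      rw [hcon] at this
      simp at this
      omega
  intro i j hk
  rcases Nat.eq_zero_or_pos i with hi | hi <;> rcases Nat.eq_zero_or_pos j with hj | hj
  · subst hi; subst hj; rfl
  · subst hi; exact hmain j hj hk
  · subst hj; exact (hmain i hi hk.symm).symm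
  · exact key_inj_good _ _ (hnl i hi) (hnl j hj) hk

-- computing both programs on the difference witness row [""]
lemma mod_one_int (x : Int) : PySem.Int.mod x 1 = 0 := by
  rw [PySem.Int.mod_eq_emod_of_pos (by norm_num)]
  exact Int.emod_one x

lemma A_val_empty_row (x : Int) : spin_x_cycles [""] x = [] := by
  show (loopA x (pvFuel [[]]) PySem.Dict.empty [[]] 0).map _ = []
  rw [show pvFuel [[]] = 17 + 1 from by norm_num [pvFuel]]
  rw [loopA]
  simp only [PySem.Dict.get?_empty]
  rw [show spinA [[]] = [] from by decide]
  rw [show (17 : Nat) = 16 + 1 from rfl, loopA]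
  rw [show (PySem.Dict.empty.insert (platKey [[]]) (0 : Int)).get? (platKey ([] : List (List Char)))
      = some 0 from rfl]
  unfold exitA
  dsimp only
  norm_num [mod_one_int, repSpinA]

lemma B_val_empty_row (x : Int) : spin_x_cycles_alt [""] x = [""] := by
  show (loopB x (pvFuel [[]]) PySem.Dict.empty [] [[]]).map _ = [""]
  rw [show pvFuel [[]] = 17 + 1 from by norm_num [pvFuel]]
  rw [loopB]
  simp only [PySem.Dict.get?_empty]
  rw [show spinB [[]] = [] from by rw [spinB_eq_spinA]; decide]
  rw [show (17 : Nat) = 16 + 1 from rfl, loopB]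
  rw [show (PySem.Dict.empty.insert (platKey [[]]) ((List.length ([] : List (List (List Char)))) : Int)).get? (platKey ([] : List (List Char)))
      = some 0 from rfl]
  unfold exitB
  dsimp only
  norm_num [mod_one_int]

-- ===== VERDICT (by name: the statement is the Claim_ definition above) =====
theorem spin_x_cycles_spec : Claim_unchanged_spin_x_cycles := by
  intro platform x _ hpre
  unfold Spec_spin_x_cycles D_spin_x_cycles
  intro hnd
  -- the char-list platform and the case split feeding key injectivity
  have hcase : (platform.map String.toList) = [] ∨
      ((∀ r ∈ platform.map String.toList, r = []) ∧ 2 ≤ (platform.map String.toList).length) ∨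
      (∃ C, 1 ≤ C ∧ (platform.map String.toList) ≠ [] ∧
        ∀ r ∈ platform.map String.toList, r.length = C) := by
    cases hplat : platform with
    | nil => left; rfl
    | cons s rest =>
      by_cases hs : s.toList.length = 0
      · right; left
        constructor
        · intro r hr
          rcases List.mem_map.mp hr with ⟨t, ht, hrt⟩
          have := hpre t (by rw [hplat]; exact ht)
          rw [hplat] at this
          simp only [List.headD_cons] at this
          rw [← hrt] at *
          exact List.eq_nil_of_length_eq_zero (by omega)
        · simp only [List.length_map, List.length_cons]
          rcases Nat.eq_zero_or_pos rest.length with h0 | h0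
          · exfalso
            have hrest : rest = [] := List.eq_nil_of_length_eq_zero h0
            have hse : s = "" := by
              cases s; simp_all
            exact hnd (by rw [hplat, hrest, hse])
          · omega
      · right; right
        refine ⟨s.toList.length, by omega, by simp, ?_⟩
        intro r hr
        rcases List.mem_map.mp hr with ⟨t, ht, hrt⟩
        have hlen := hpre t (by rw [hplat]; exact ht)
        rw [hplat] at hlen
        simp only [List.headD_cons] at hlen
        rw [← hrt]
        exact hlen
  have hinj := key_inj_all (platform.map String.toList) hcase
  have hdict : ∀ (k : List Char) (v : Int), (PySem.Dict.empty : PySem.Dict (List Char) Int).get? k = some v ↔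
      ∃ i : Nat, i < 0 ∧ v = (i : Int) ∧ k = platKey (repSpinA i (platform.map String.toList)) := by
    intro k v
    simp [PySem.Dict.get?_empty]
  have h := loop_eq x (platform.map String.toList) hinj (pvFuel (platform.map String.toList)) 0
    PySem.Dict.empty [] (by simp) hdict
  unfold spin_x_cycles spin_x_cycles_alt
  rw [show repSpinA 0 (platform.map String.toList) = platform.map String.toList from rfl] at h
  rw [show ((0 : Nat) : Int) = (0 : Int) from rfl] at h
  rw [h]

theorem spin_x_cycles_changed : Claim_changed_spin_x_cycles := by
  unfold Claim_changed_spin_x_cycles; decide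

theorem spin_x_cycles_tight : Claim_exact_spin_x_cycles := by
  intro platform x _ _ hD
  unfold D_spin_x_cycles at hD
  rw [hD, A_val_empty_row, B_val_empty_row]
  simp
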